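-- pv_equiv track=rewrite | github.com/calebkey121/sandbox | books/food_lines/food.py | solve
-- ===== SOURCE A (Python) =====
-- def solve(n, m, original_lines: tuple):
--     lines = list(original_lines)
--     joined = [] # To track the lenght of the lines we joing, for the solution
--     for _ in range(m):
--         # Get the shortest line information
--         min_value = min(lines)
--         min_index = lines.index(min_value)
--
--         # Note the length of the line we joined for the solution
--         joined.append(min_value)
--
--         # Joined line is now one longer
--         lines[min_index] += 1
--     return joined
-- ===== SOURCE B (Python) =====
-- def solve(n, m, original_lines: tuple):
--     out = []
--     if m <= 0:
--         return out
--     cnt = {}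
--     for x in original_lines:
--         cnt[x] = cnt.get(x, 0) + 1
--     v = min(original_lines)
--     remaining = m
--     while remaining > 0:
--         c = cnt.get(v, 0)
--         if remaining <= c:
--             out += [v] * remaining
--             return out
--         out += [v] * c
--         remaining -= c
--         cnt[v + 1] = cnt.get(v + 1, 0) + c
--         v += 1
--     return out
-- ===== Notes on version B (the rewrite author's own statement) =====
-- stated objective: faster
-- what changed: Replaces the per-step min+index scan over the whole list with a value counter processed in nondecreasing value order, emitting each value's whole batch at once.
import Mathlib
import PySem

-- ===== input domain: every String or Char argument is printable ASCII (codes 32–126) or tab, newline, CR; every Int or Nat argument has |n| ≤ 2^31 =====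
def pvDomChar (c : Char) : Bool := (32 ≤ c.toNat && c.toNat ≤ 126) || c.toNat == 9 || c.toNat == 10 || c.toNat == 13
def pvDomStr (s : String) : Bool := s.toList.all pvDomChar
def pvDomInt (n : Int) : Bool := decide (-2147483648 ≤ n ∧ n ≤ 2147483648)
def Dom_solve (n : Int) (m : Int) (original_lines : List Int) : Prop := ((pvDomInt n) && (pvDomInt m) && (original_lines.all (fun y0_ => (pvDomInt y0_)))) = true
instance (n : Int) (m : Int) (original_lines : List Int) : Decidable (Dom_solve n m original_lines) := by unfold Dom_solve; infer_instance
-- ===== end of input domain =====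

-- B replaces A's per-step min+index scan by a value counter swept in increasing value order
-- (each round emits a whole batch of equal minima at once): asymptotically faster.

-- ===== PORT A =====
-- loop body of A's 'for _ in range(m)': state = (lines, joined)
def solveStep (st : List Int × List Int) : List Int × List Int :=
  match PySem.List.min? st.1 (fun x => x) with
  | none => st          -- Python: min([]) raises ValueError; excluded by Pre_solve
  | some mv =>
    match PySem.List.index? st.1 mv with
    | none => st        -- unreachable: mv ∈ lines
    | some i => (st.1.set i (mv + 1), st.2 ++ [mv])

def solve (n : Int) (m : Int) (original_lines : List Int) : List Int :=
  ((PySem.List.pyRange 0 m 1).foldl (fun st _ => solveStep st) (original_lines, ([] : List Int))).2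

-- ===== PORT B =====
-- Source B's 'while remaining > 0' loop; recursion on remaining (as a Nat).
-- The 'c ≤ 0 → out' branch only makes the recursion terminate; under Pre_solve c ≥ 1 always.
def solveAltLoop : Nat → PySem.Dict Int Int → Int → List Int → List Int
  | 0, _, _, out => out
  | r+1, cnt, v, out =>
    let c := cnt.getD v 0
    if c ≤ 0 then out
    else if ((r+1 : Nat) : Int) ≤ c then out ++ List.replicate (r+1) v
    else solveAltLoop (r+1 - c.toNat) (cnt.insert (v+1) (cnt.getD (v+1) 0 + c)) (v+1)
           (out ++ List.replicate c.toNat v)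
  termination_by r => r
  decreasing_by omega

def solve_alt (n : Int) (m : Int) (original_lines : List Int) : List Int :=
  if m ≤ 0 then []
  else
    let cnt := original_lines.foldl (fun d x => d.insert x (d.getD x 0 + 1)) PySem.Dict.empty
    match PySem.List.min? original_lines (fun x => x) with
    | none => []        -- Python: min([]) raises ValueError; excluded by Pre_solve
    | some v => solveAltLoop m.toNat cnt v []

-- ===== PRECONDITION & SPEC =====
-- Pre_ excludes only the inputs where both Pythons raise ValueError: empty lines with m > 0.
def Pre_solve (n : Int) (m : Int) (original_lines : List Int) : Prop :=
  original_lines ≠ [] ∨ m ≤ 0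
instance (n : Int) (m : Int) (original_lines : List Int) : Decidable (Pre_solve n m original_lines) := by unfold Pre_solve; infer_instance

def pvWitness_solve : Int × Int × List Int := (0, 4, [2, 1, 2])

def Spec_solve (n : Int) (m : Int) (original_lines : List Int) (out : List Int) : Prop := out = solve_alt n m original_lines
instance (n : Int) (m : Int) (original_lines : List Int) (out : List Int) : Decidable (Spec_solve n m original_lines out) := by unfold Spec_solve; infer_instance

-- ===== CLAIM (what is proved, stated in full; the proofs are below) =====
def Claim_equal_solve : Prop := ∀ (n : Int) (m : Int) (original_lines : List Int), Dom_solve n m original_lines → Pre_solve n m original_lines → Spec_solve n m original_lines (solve n m original_lines)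

-- ===== LEMMAS AND PROOFS =====

-- a fold whose body ignores the element is an iterate
theorem foldl_ignore_elem_eq_iterate {α β : Type} (f : α → α) (l : List β) (init : α) :
    l.foldl (fun st _ => f st) init = f^[l.length] init := by
  induction l generalizing init with
  | nil => rfl
  | cons x t ih => simp [List.foldl_cons, ih, Function.iterate_succ_apply]

-- min? (no key) is characterised by its value on Int lists
theorem min?_eq_some_of_mem_of_min {L : List Int} {v : Int}
    (hmem : v ∈ L) (hmin : ∀ x ∈ L, v ≤ x) :
    PySem.List.min? L (fun x => x) = some v := by
  cases h : PySem.List.min? L (fun x => x) with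
  | none =>
    rw [PySem.List.min?_eq_none_iff] at h
    subst h; simp at hmem
  | some u =>
    have hu := PySem.List.min?_mem h
    have h1 : u ≤ v := PySem.List.min?_isMin h v hmem
    have h2 : v ≤ u := hmin u hu
    rw [le_antisymm h1 h2]

-- setting the element right after a prefix
theorem set_at_len (pre suf : List Int) (v x : Int) :
    (pre ++ v :: suf).set pre.length x = pre ++ x :: suf := by
  induction pre with
  | nil => rfl
  | cons h t ih => simp [ih]

-- one A-step on a list with minimum v: record v, and the list is v replaced by v+1 (as a multiset)
theorem solveStep_eq {L out : List Int} {v : Int}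
    (h : PySem.List.min? L (fun x => x) = some v) :
    ∃ L', solveStep (L, out) = (L', out ++ [v]) ∧ L'.Perm ((v + 1) :: L.erase v) := by
  have hv : v ∈ L := PySem.List.min?_mem h
  obtain ⟨i, hi⟩ : ∃ i, PySem.List.index? L v = some i :=
    Option.isSome_iff_exists.mp ((PySem.List.index?_isSome_iff L v).mpr hv)
  obtain ⟨pre, suf, hL, hlen, hpre⟩ := (PySem.List.index?_eq_some_iff L v i).mp hi
  have hi' : List.idxOf? v L = some i := by
    rw [← PySem.List.index?_eq_idxOf?]; exact hi
  refine ⟨L.set i (v + 1), ?_, ?_⟩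
  · simp [solveStep, h, hi']
  · subst hL
    subst hlen
    rw [set_at_len pre suf v (v + 1), List.erase_append_right (v :: suf) hpre,
        List.erase_cons_head]
    exact List.perm_middle

-- k ≤ count v A-steps from a list whose elements are all ≥ v: records k copies of v
theorem batch (k : Nat) : ∀ (L out : List Int) (v : Int),
    (∀ x ∈ L, v ≤ x) → k ≤ L.count v →
    ∃ L', solveStep^[k] (L, out) = (L', out ++ List.replicate k v) ∧
      L'.count v = L.count v - k ∧
      L'.count (v + 1) = L.count (v + 1) + k ∧
      (∀ w, w ≠ v → w ≠ v + 1 → L'.count w = L.count w) ∧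
      (∀ x ∈ L', v ≤ x) := by
  induction k with
  | zero =>
    intro L out v hmem _
    exact ⟨L, by simp, by simp, by simp, fun w _ _ => rfl, hmem⟩
  | succ k ih =>
    intro L out v hmem hk
    obtain ⟨L', hit, hcv, hcv1, hother, hmem'⟩ := ih L out v hmem (Nat.le_of_succ_le hk)
    have hvL' : v ∈ L' := List.count_pos_iff.mp (by omega)
    have hmin' : PySem.List.min? L' (fun x => x) = some v :=
      min?_eq_some_of_mem_of_min hvL' hmem'
    obtain ⟨L'', hstep, hperm⟩ :=
      solveStep_eq (out := out ++ List.replicate k v) hmin'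
    have hcnt : ∀ w, L''.count w = ((v + 1) :: L'.erase v).count w :=
      fun w => hperm.count_eq w
    have hne : v ≠ v + 1 := by omega
    refine ⟨L'', ?_, ?_, ?_, ?_, ?_⟩
    · rw [Function.iterate_succ_apply', hit, hstep, List.append_assoc,
          ← List.replicate_succ']
    · rw [hcnt v, List.count_cons_of_ne (by omega : (v : Int) + 1 ≠ v), List.count_erase_self]
      omega
    · rw [hcnt (v + 1), List.count_cons_self, List.count_erase_of_ne (by omega)]
      omega
    · intro w hw hw1
      rw [hcnt w, List.count_cons_of_ne (Ne.symm hw1), List.count_erase_of_ne hw]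
      exact hother w hw hw1
    · intro x hx
      rcases List.mem_cons.mp ((hperm.mem_iff).mp hx) with h1 | h2
      · omega
      · exact hmem' x (List.mem_of_mem_erase h2)

-- main simulation: A's remaining r steps equal B's loop, given the counter invariant
theorem main_sim (r : Nat) : ∀ (L out : List Int) (cnt : PySem.Dict Int Int) (v : Int),
    0 < r → (∀ x ∈ L, v ≤ x) → 0 < L.count v →
    (∀ w, v ≤ w → cnt.getD w 0 = (L.count w : Int)) →
    (solveStep^[r] (L, out)).2 = solveAltLoop r cnt v out := by
  induction r using Nat.strong_induction_on with
  | _ r ih =>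
    intro L out cnt v hr hmem hcv hcnt
    obtain ⟨r', rfl⟩ : ∃ r', r = r' + 1 := ⟨r - 1, by omega⟩
    have hc : cnt.getD v 0 = (L.count v : Int) := hcnt v le_rfl
    have hcpos : ¬ cnt.getD v 0 ≤ 0 := by omega
    simp only [solveAltLoop, if_neg hcpos]
    by_cases hle : ((r' + 1 : Nat) : Int) ≤ cnt.getD v 0
    · rw [if_pos hle]
      have hk : r' + 1 ≤ L.count v := by omega
      obtain ⟨L', hit, -, -, -, -⟩ := batch (r' + 1) L out v hmem hk
      rw [hit]
    · rw [if_neg hle]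
      set k := L.count v with hkdef
      have hkt : (cnt.getD v 0).toNat = k := by omega
      have hklt : k < r' + 1 := by omega
      obtain ⟨L', hit, hcv', hcv1', hother', hmem'⟩ := batch k L out v hmem le_rfl
      have hsplit : r' + 1 = (r' + 1 - k) + k := by omega
      have hnotv : v ∉ L' := by
        rw [← List.count_eq_zero]; omega
      have hmem1 : ∀ x ∈ L', v + 1 ≤ x := by
        intro x hx
        have h1 := hmem' x hx
        have h2 : x ≠ v := fun hxv => hnotv (hxv ▸ hx)
        omega
      have hcnt1 : ∀ w, v + 1 ≤ w →
          (cnt.insert (v + 1) (cnt.getD (v + 1) 0 + cnt.getD v 0)).getD w 0 = (L'.count w : Int) := by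
        intro w hw
        rw [PySem.Dict.getD_insert]
        by_cases hwv : w = v + 1
        · rw [if_pos hwv, hwv, hcnt (v + 1) (by omega), hcv1']
          push_cast
          omega
        · rw [if_neg hwv, hcnt w (by omega), hother' w (by omega) hwv]
      have := ih (r' + 1 - k) (by omega) L' (out ++ List.replicate k v)
        (cnt.insert (v + 1) (cnt.getD (v + 1) 0 + cnt.getD v 0)) (v + 1)
        (by omega) hmem1 (by omega) hcnt1
      rw [hkt, hsplit, Function.iterate_add_apply, hit, this, Nat.add_sub_cancel]

-- ===== VERDICT (by name: the statement is the Claim_ definition above) =====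
theorem solve_spec : Claim_equal_solve := by
  intro n m L _ hpre
  unfold Spec_solve solve solve_alt
  by_cases hm : m ≤ 0
  · rw [if_pos hm, PySem.List.pyRange_one_eq_nil (by omega)]
    rfl
  · rw [if_neg hm]
    have hL : L ≠ [] := by
      rcases hpre with h | h
      · exact h
      · omega
    obtain ⟨v, hv⟩ : ∃ v, PySem.List.min? L (fun x => x) = some v := by
      cases h : PySem.List.min? L (fun x => x) with
      | none => exact absurd ((PySem.List.min?_eq_none_iff L _).mp h) hL
      | some u => exact ⟨u, rfl⟩
    simp only [hv, PySem.Dict.foldl_insert_getD_add_one_eq_counter]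
    rw [foldl_ignore_elem_eq_iterate, PySem.List.length_pyRange_one]
    have h0 : ((m : Int) - 0).toNat = m.toNat := by omega
    rw [h0]
    apply main_sim
    · omega
    · exact fun x hx => PySem.List.min?_isMin hv x hx
    · exact List.count_pos_iff.mpr (PySem.List.min?_mem hv)
    · intro w _
      exact PySem.Dict.getD_counter L w
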